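-- pv_equiv track=rewrite | github.com/jieun9851/EOSE-UWordMap | run_span_ud_mtl_finetuning copy.py | bert_extract_item
-- ===== SOURCE A (Python) =====
-- def bert_extract_item(start_logits, end_logits):
--     S = []
--     for i, s_l in enumerate(start_logits):
--         if s_l == 0:
--             continue
--         for j, e_l in enumerate(end_logits[i:]):
--             if s_l == e_l:
--                 S.append((s_l, i, i + j))
--                 break
--     return S
-- ===== SOURCE B (Python) =====
-- def bert_extract_item(start_logits, end_logits):
--     # One backward sweep: first_at[v] = smallest index j >= i with end_logits[j] == v.
--     n, m = len(start_logits), len(end_logits)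
--     first_at = {}
--     out = []
--     for i in range(max(n, m) - 1, -1, -1):
--         if i < m:
--             first_at[end_logits[i]] = i
--         if i < n:
--             s_l = start_logits[i]
--             if s_l != 0:
--                 j = first_at.get(s_l)
--                 if j is not None:
--                     out.append((s_l, i, j))
--     out.reverse()
--     return out
-- ===== Notes on version B (the rewrite author's own statement) =====
-- stated objective: faster
-- what changed: Replaced A's per-start-index rescan of end_logits[i:] with a single backward sweep that maintains a dict mapping each value to its first end position >= the current index, so each start index is answered by one dict lookup.
import Mathlib
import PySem

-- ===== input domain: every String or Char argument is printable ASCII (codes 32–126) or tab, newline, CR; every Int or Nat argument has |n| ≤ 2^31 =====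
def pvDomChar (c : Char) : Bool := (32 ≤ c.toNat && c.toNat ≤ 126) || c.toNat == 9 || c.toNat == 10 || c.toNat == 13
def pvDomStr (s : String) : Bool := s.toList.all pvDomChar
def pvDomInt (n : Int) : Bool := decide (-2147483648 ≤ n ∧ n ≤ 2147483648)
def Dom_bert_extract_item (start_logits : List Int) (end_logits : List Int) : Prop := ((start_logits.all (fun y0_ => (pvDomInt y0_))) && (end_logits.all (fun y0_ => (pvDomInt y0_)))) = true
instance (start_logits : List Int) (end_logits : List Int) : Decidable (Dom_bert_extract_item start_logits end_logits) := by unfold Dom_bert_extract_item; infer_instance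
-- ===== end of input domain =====

-- B replaces A's per-start rescans of end_logits with ONE backward sweep keeping, per value,
-- the first end position ≥ the current index (objective: faster, O(n·m) → O(n+m)).

-- ===== PORT A =====
-- inner 'for j, e_l in enumerate(end_logits[i:]): if s_l == e_l: append; break'
def pvInnerA (s_l : Int) (i : Int) : Int → List Int → Option (Int × Int × Int)
  | _, [] => none
  | j, e_l :: rest => if s_l = e_l then some (s_l, i, i + j) else pvInnerA s_l i (j + 1) rest

def bert_extract_item (start_logits : List Int) (end_logits : List Int) : List (Int × Int × Int) :=
  (PySem.List.enumerate start_logits).foldl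
    (fun (S : List (Int × Int × Int)) (p : Int × Int) =>
      if p.2 = 0 then S
      else
        match pvInnerA p.2 p.1 0 (PySem.List.slice end_logits (some p.1) none) with
        | none => S
        | some x => S ++ [x])
    []

-- ===== PORT B =====
-- one iteration of B's backward loop body (updates first_at, then possibly appends)
def pvStepB (start_logits : List Int) (end_logits : List Int)
    (st : PySem.Dict Int Int × List (Int × Int × Int)) (i : Int) :
    PySem.Dict Int Int × List (Int × Int × Int) :=
  let d := if i < (end_logits.length : Int)
             then st.1.insert (PySem.List.pyGetD end_logits i 0) i  -- index always in range here
             else st.1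
  if i < (start_logits.length : Int) then
    let s_l := PySem.List.pyGetD start_logits i 0                    -- index always in range here
    if s_l ≠ 0 then
      match d.get? s_l with
      | some j => (d, st.2 ++ [(s_l, i, j)])
      | none => (d, st.2)
    else (d, st.2)
  else (d, st.2)

def bert_extract_item_alt (start_logits : List Int) (end_logits : List Int) : List (Int × Int × Int) :=
  let n : Int := start_logits.length
  let m : Int := end_logits.length
  (((PySem.List.pyRange (max n m - 1) (-1) (-1)).foldl
      (pvStepB start_logits end_logits) (PySem.Dict.empty, [])).2).reverse

-- ===== PRECONDITION & SPEC =====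
def Spec_bert_extract_item (start_logits : List Int) (end_logits : List Int) (out : List (Int × Int × Int)) : Prop := out = bert_extract_item_alt start_logits end_logits
instance (start_logits : List Int) (end_logits : List Int) (out : List (Int × Int × Int)) : Decidable (Spec_bert_extract_item start_logits end_logits out) := by unfold Spec_bert_extract_item; infer_instance

-- ===== CLAIM (what is proved, stated in full; the proofs are below) =====
def Claim_equal_bert_extract_item : Prop := ∀ (start_logits : List Int) (end_logits : List Int), Dom_bert_extract_item start_logits end_logits → Spec_bert_extract_item start_logits end_logits (bert_extract_item start_logits end_logits)

-- ===== LEMMAS AND PROOFS =====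

-- first end position ≥ i holding value v
def pvFirstGe (e : List Int) (v : Int) (i : Nat) : Option Nat :=
  (List.findIdx? (fun x => x == v) (e.drop i)).map (fun k => i + k)

-- the item produced for start index i (empty or a singleton)
def pvContrib (s e : List Int) (i : Nat) : List (Int × Int × Int) :=
  match s[i]? with
  | none => []
  | some sl =>
    if sl = 0 then []
    else
      match pvFirstGe e sl i with
      | none => []
      | some j => [(sl, (i : Int), (j : Int))]

lemma pvInnerA_eq (sl : Int) (i : Int) : ∀ (l : List Int) (j : Int),
    pvInnerA sl i j l =
      (List.findIdx? (fun x => x == sl) l).map (fun k => (sl, i, i + j + (k : Int)))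
  | [], _ => rfl
  | e_l :: rest, j => by
    simp only [pvInnerA, List.findIdx?_cons]
    by_cases h : sl = e_l
    · simp [h]
    · have h' : (e_l == sl) = false := by simp [Ne.symm h]
      rw [if_neg h, h', if_neg (by simp)]
      rw [pvInnerA_eq sl i rest (j + 1)]
      cases List.findIdx? (fun x => x == sl) rest with
      | none => rfl
      | some k => simp [Option.map]; ring

lemma pvA_contrib (s e : List Int) (k : Nat) (hk : k < s.length) :
    (if s[k] = 0 then ([] : List (Int × Int × Int))
     else
       match pvInnerA s[k] (k : Int) 0 (PySem.List.slice e (some (k : Int)) none) with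
       | none => []
       | some x => [x]) = pvContrib s e k := by
  rw [PySem.List.slice_from_natCast, pvInnerA_eq]
  simp only [pvContrib, pvFirstGe, List.getElem?_eq_getElem hk]
  by_cases h0 : s[k] = 0
  · simp [h0]
  · rw [if_neg h0, if_neg h0]
    cases List.findIdx? (fun x => x == s[k]) (e.drop k) with
    | none => rfl
    | some j => simp

lemma pvA_eq_flatMap (s e : List Int) :
    bert_extract_item s e = (List.range s.length).flatMap (pvContrib s e) := by
  unfold bert_extract_item
  have hbody : (fun (S : List (Int × Int × Int)) (p : Int × Int) =>
      if p.2 = (0:Int) then S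
      else
        match pvInnerA p.2 p.1 0 (PySem.List.slice e (some p.1) none) with
        | none => S
        | some x => S ++ [x]) =
      (fun (S : List (Int × Int × Int)) (p : Int × Int) => S ++
        (if p.2 = (0:Int) then []
         else
           match pvInnerA p.2 p.1 0 (PySem.List.slice e (some p.1) none) with
           | none => []
           | some x => [x])) := by
    funext S p
    by_cases h : p.2 = 0
    · simp [h]
    · rw [if_neg h, if_neg h]
      cases pvInnerA p.2 p.1 0 (PySem.List.slice e (some p.1) none) <;> simp
  rw [hbody, PySem.List.foldl_append_eq_flatMap, List.nil_append,
    PySem.List.enumerate_eq_map_pyRange s 0]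
  have hr : PySem.List.pyRange 0 (PySem.List.len s) 1 = (List.range s.length).map (fun k : Nat => (k : Int)) := by
    exact PySem.List.pyRange_zero_nat s.length
  rw [hr, List.map_map, List.flatMap_map]
  apply List.flatMap_congr  -- pointwise on k ∈ range
  intro k hk
  have hk' : k < s.length := List.mem_range.mp hk
  simp only [Function.comp, PySem.List.pyGetD_natCast, List.getD_eq_getElem?_getD, List.getElem?_eq_getElem hk',
    Option.getD_some]
  exact pvA_contrib s e k hk'

-- B's dictionary invariant after having processed all indices ≥ i
def pvDInv (e : List Int) (d : PySem.Dict Int Int) (i : Nat) : Prop :=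
  ∀ v, d.get? v = (pvFirstGe e v i).map (fun j => (j : Int))

lemma pvFirstGe_succ (e : List Int) (v : Int) (i : Nat) (hi : i < e.length) :
    pvFirstGe e v i = if e[i] = v then some i else pvFirstGe e v (i + 1) := by
  unfold pvFirstGe
  rw [← List.getElem_cons_drop hi, List.findIdx?_cons]
  by_cases h : e[i] = v
  · simp [h]
  · have h' : (e[i] == v) = false := by simp [h]
    rw [h', if_neg (by simp), if_neg h]
    cases List.findIdx? (fun x => x == v) (e.drop (i + 1)) with
    | none => rfl
    | some k => simp [Option.map]; omega

lemma pvFirstGe_ge_len (e : List Int) (v : Int) (i : Nat) (hi : e.length ≤ i) :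
    pvFirstGe e v i = none := by
  unfold pvFirstGe
  rw [List.drop_eq_nil_of_le hi]
  rfl

lemma pvDInv_step (e : List Int) (d : PySem.Dict Int Int) (i : Nat) (h : pvDInv e d (i + 1)) :
    pvDInv e (if (i : Int) < (e.length : Int)
                then d.insert (PySem.List.pyGetD e (i : Int) 0) (i : Int)
                else d) i := by
  intro v
  by_cases hi : i < e.length
  · rw [if_pos (by exact_mod_cast hi)]
    rw [PySem.List.pyGetD_natCast, List.getD_eq_getElem?_getD, List.getElem?_eq_getElem hi,
      Option.getD_some]
    rw [PySem.Dict.get?_insert, pvFirstGe_succ e v i hi]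
    by_cases hv : e[i] = v
    · simp [hv]
    · rw [if_neg (Ne.symm hv), if_neg hv, h v]
  · rw [if_neg (by exact_mod_cast hi), h v, pvFirstGe_ge_len e v (i + 1) (by omega),
      pvFirstGe_ge_len e v i (by omega)]

-- contribution as B computes it at index i (for any i, also ≥ s.length)
lemma pvStepB_eq (s e : List Int) (d : PySem.Dict Int Int) (out : List (Int × Int × Int))
    (i : Nat) (h : pvDInv e d (i + 1)) :
    pvStepB s e (d, out) (i : Int) =
      ((if (i : Int) < (e.length : Int)
          then d.insert (PySem.List.pyGetD e (i : Int) 0) (i : Int) else d),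
       out ++ pvContrib s e i) := by
  unfold pvStepB
  set d' := (if (i : Int) < (e.length : Int)
              then d.insert (PySem.List.pyGetD e (i : Int) 0) (i : Int) else d) with hd'
  have hinv : pvDInv e d' i := pvDInv_step e d i h
  by_cases hn : i < s.length
  · rw [if_pos (by exact_mod_cast hn)]
    simp only [PySem.List.pyGetD_natCast, List.getD_eq_getElem?_getD,
      List.getElem?_eq_getElem hn, Option.getD_some]
    simp only [pvContrib, List.getElem?_eq_getElem hn]
    by_cases h0 : s[i] = 0
    · simp [h0]
    · rw [if_pos h0, hinv s[i], if_neg h0]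
      cases hfg : pvFirstGe e s[i] i with
      | none => simp
      | some j => simp
  · rw [if_neg (by exact_mod_cast hn)]
    simp [pvContrib, List.getElem?_eq_none (show s.length ≤ i by omega)]

-- reversed result of B's loop over indices i-1 … 0
def pvRevRes (s e : List Int) : Nat → List (Int × Int × Int)
  | 0 => []
  | i + 1 => pvContrib s e i ++ pvRevRes s e i

lemma pvDescList (i : Nat) :
    PySem.List.pyRange ((i : Int) + 1 - 1) (-1) (-1) = (i : Int) :: PySem.List.pyRange ((i : Int) - 1) (-1) (-1) := by
  rw [show (i : Int) + 1 - 1 = (i : Int) by ring]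
  exact PySem.List.pyRange_neg_one_cons (by omega)

lemma pvBLoop (s e : List Int) : ∀ (i : Nat) (d : PySem.Dict Int Int) (out : List (Int × Int × Int)),
    pvDInv e d i →
    ((PySem.List.pyRange ((i : Int) - 1) (-1) (-1)).foldl (pvStepB s e) (d, out)).2 =
      out ++ pvRevRes s e i
  | 0, d, out, _ => by
    rw [PySem.List.pyRange_neg_one_eq_nil (by omega)]
    simp [pvRevRes]
  | i + 1, d, out, h => by
    rw [show (((i : Nat) + 1 : Nat) : Int) = (i : Int) + 1 by push_cast; ring, pvDescList i]
    simp only [List.foldl_cons]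
    rw [pvStepB_eq s e d out i (by exact_mod_cast h)]
    rw [pvBLoop s e i _ _ (pvDInv_step e d i (by exact_mod_cast h))]
    simp [pvRevRes]

lemma pvContrib_short (s e : List Int) (i : Nat) :
    (pvContrib s e i).reverse = pvContrib s e i := by
  cases h : s[i]? with
  | none => simp [pvContrib, h]
  | some sl =>
    by_cases h0 : sl = 0
    · simp [pvContrib, h, h0]
    · cases hf : pvFirstGe e sl i <;> simp [pvContrib, h, h0, hf]

lemma pvRevRes_reverse (s e : List Int) : ∀ (i : Nat),
    (pvRevRes s e i).reverse = (List.range i).flatMap (pvContrib s e)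
  | 0 => rfl
  | i + 1 => by
    simp only [pvRevRes, List.reverse_append, pvRevRes_reverse s e i, List.range_succ,
      List.flatMap_append, pvContrib_short]
    simp

lemma pvDInv_top (s e : List Int) : pvDInv e PySem.Dict.empty (max s.length e.length) := by
  intro v
  rw [PySem.Dict.get?_empty, pvFirstGe_ge_len e v _ (by omega)]
  rfl

lemma pvB_eq_flatMap (s e : List Int) :
    bert_extract_item_alt s e = (List.range (max s.length e.length)).flatMap (pvContrib s e) := by
  unfold bert_extract_item_alt
  have hmax : (max (s.length : Int) (e.length : Int)) = ((max s.length e.length : Nat) : Int) := by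
    push_cast; rfl
  simp only [hmax]
  rw [pvBLoop s e (max s.length e.length) _ _ (pvDInv_top s e), List.nil_append,
    pvRevRes_reverse]

lemma pvFlatMap_trunc (s e : List Int) :
    (List.range (max s.length e.length)).flatMap (pvContrib s e) =
      (List.range s.length).flatMap (pvContrib s e) := by
  have h : max s.length e.length = s.length + (max s.length e.length - s.length) := by omega
  rw [h, List.range_add, List.flatMap_append]
  have hz : ((List.range (max s.length e.length - s.length)).map (s.length + ·)).flatMap
      (pvContrib s e) = [] := by
    rw [List.flatMap_map]
    apply List.flatMap_eq_nil_iff.mpr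
    intro k _
    simp [pvContrib]
  rw [hz, List.append_nil]

-- ===== VERDICT (by name: the statement is the Claim_ definition above) =====
theorem bert_extract_item_spec : Claim_equal_bert_extract_item := by
  intro s e _
  unfold Spec_bert_extract_item
  rw [pvA_eq_flatMap, pvB_eq_flatMap, pvFlatMap_trunc]
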